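-- pv_equiv track=rewrite | github.com/eunhee-dev/problem-solving | 0x10. dynamic programming/2302번. 극장 좌석/solve.py | solve
-- ===== SOURCE A (Python) =====
-- def solve(n: int, vip: set[int]) -> int:
--     if n == 1:
--         return 1
--
--     dp = [0] * (n + 1)
--     dp[0], dp[1] = 1, 1
--
--     for i in range(2, n + 1):
--         if i in vip or i - 1 in vip:
--             dp[i] = dp[i - 1]
--         else:
--             dp[i] = dp[i - 1] + dp[i - 2]
--
--     return dp[n]
-- ===== SOURCE B (Python) =====
-- def solve(n: int, vip: set[int]) -> int:
--     # segment decomposition: answer = product over maximal runs of free seats of tiling(run)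
--     def tiling(length):
--         a, b = 1, 1
--         for _ in range(length):
--             a, b = b, a + b
--         return a
--
--     ans, run = 1, 0
--     for i in range(1, n + 1):
--         if i in vip:
--             ans *= tiling(run)
--             run = 0
--         else:
--             run += 1
--     return ans * tiling(run)
-- ===== Notes on version B (the rewrite author's own statement) =====
-- stated objective: alternative
-- what changed: Replaces the full O(n) dp array recurrence by a single pass that tracks only the current run of free seats and a running product, multiplying in a Fibonacci tiling count (computed by a two-variable rolling loop) at each VIP boundary.
import Mathlib
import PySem

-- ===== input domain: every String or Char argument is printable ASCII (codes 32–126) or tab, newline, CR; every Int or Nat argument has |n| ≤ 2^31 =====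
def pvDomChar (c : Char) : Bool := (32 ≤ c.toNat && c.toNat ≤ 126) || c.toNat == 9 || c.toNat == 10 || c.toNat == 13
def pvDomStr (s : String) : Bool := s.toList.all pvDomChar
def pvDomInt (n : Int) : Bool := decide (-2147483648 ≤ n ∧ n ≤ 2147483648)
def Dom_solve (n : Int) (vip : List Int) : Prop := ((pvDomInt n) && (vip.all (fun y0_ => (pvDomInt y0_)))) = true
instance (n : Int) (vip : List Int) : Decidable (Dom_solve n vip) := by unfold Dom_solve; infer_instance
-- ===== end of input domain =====

-- B replaces A's dp array over all seats by a single pass keeping only the current run of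
-- free seats and a running product of Fibonacci tiling counts (objective: alternative, O(1) space).

-- ===== PORT A =====
def solve (n : Int) (vip : List Int) : Int :=
  if n = 1 then 1
  else
    -- dp = [0] * (n + 1); dp[0], dp[1] = 1, 1   (writes in range for n ≥ 1; Pre_ excludes n ≤ 0, where Python raises IndexError)
    let dp : List Int := ((List.replicate (n + 1).toNat (0 : Int)).set 0 1).set 1 1
    let dp := (PySem.List.pyRange 2 (n + 1) 1).foldl
      (fun dp i =>
        if vip.contains i || vip.contains (i - 1) then
          dp.set i.toNat (PySem.List.pyGetD dp (i - 1) 0)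
        else
          dp.set i.toNat (PySem.List.pyGetD dp (i - 1) 0 + PySem.List.pyGetD dp (i - 2) 0))
      dp
    PySem.List.pyGetD dp n 0

-- ===== PORT B =====
-- a, b = 1, 1; for _ in range(length): a, b = b, a + b; return a
def tiling (length : Int) : Int :=
  ((PySem.List.pyRange 0 length 1).foldl (fun (p : Int × Int) _ => (p.2, p.1 + p.2)) (1, 1)).1

def solve_alt (n : Int) (vip : List Int) : Int :=
  let p := (PySem.List.pyRange 1 (n + 1) 1).foldl
    (fun (p : Int × Int) i =>
      if vip.contains i then (p.1 * tiling p.2, 0) else (p.1, p.2 + 1))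
    (1, 0)
  p.1 * tiling p.2

-- ===== PRECONDITION & SPEC =====
-- Pre_ excludes exactly n ≤ 0, where Python A raises IndexError (dp[0]/dp[1] written into a list of length ≤ 1).
def Pre_solve (n : Int) (vip : List Int) : Prop := 1 ≤ n
instance (n : Int) (vip : List Int) : Decidable (Pre_solve n vip) := by unfold Pre_solve; infer_instance
def pvWitness_solve : Int × List Int := (4, [2])

def Spec_solve (n : Int) (vip : List Int) (out : Int) : Prop := out = solve_alt n vip
instance (n : Int) (vip : List Int) (out : Int) : Decidable (Spec_solve n vip out) := by unfold Spec_solve; infer_instance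

-- ===== CLAIM (what is proved, stated in full; the proofs are below) =====
def Claim_equal_solve : Prop := ∀ (n : Int) (vip : List Int), Dom_solve n vip → Pre_solve n vip → Spec_solve n vip (solve n vip)

-- ===== LEMMAS AND PROOFS =====

-- Fibonacci tiling counts: f 0 = f 1 = 1, f (k+2) = f (k+1) + f k
def fib2 : Nat → Int
  | 0 => 1
  | 1 => 1
  | (k+2) => fib2 (k+1) + fib2 k

-- recursive model of A's dp array
def dpm (vip : List Int) : Nat → Int
  | 0 => 1
  | 1 => 1
  | (i+2) =>
    if ((i : Int) + 2) ∈ vip ∨ ((i : Int) + 1) ∈ vip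
    then dpm vip (i+1) else dpm vip (i+1) + dpm vip i

-- recursive model of B's (ans, run) state after processing seats 1..i
def st (vip : List Int) : Nat → Int × Nat
  | 0 => (1, 0)
  | (i+1) =>
    let p := st vip i
    if ((i : Int) + 1) ∈ vip then (p.1 * fib2 p.2, 0) else (p.1, p.2 + 1)

theorem tiling_fold (k : Nat) :
    (PySem.List.pyRange 0 (k : Int) 1).foldl (fun (p : Int × Int) _ => (p.2, p.1 + p.2)) (1, 1)
      = (fib2 k, fib2 (k+1)) := by
  induction k with
  | zero => simp [PySem.List.pyRange_one_eq_nil, fib2]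
  | succ m ih =>
    rw [show ((m+1 : Nat) : Int) = (m : Int) + 1 by push_cast; ring,
        PySem.List.pyRange_one_succ_right (by positivity), List.foldl_append, ih]
    simp [fib2, Int.add_comm]

theorem tiling_nat (k : Nat) : tiling (k : Int) = fib2 k := by
  unfold tiling; rw [tiling_fold]

-- invariant linking A's dp to B's running state
theorem inv (vip : List Int) (i : Nat) :
    dpm vip i = (st vip i).1 * fib2 (st vip i).2 ∧
      ((st vip i).2 = 0 ∨ dpm vip (i - 1) = (st vip i).1 * fib2 ((st vip i).2 - 1)) := by
  induction i with
  | zero => simp [st, dpm, fib2]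
  | succ j ih =>
    obtain ⟨ih1, ih2⟩ := ih
    by_cases h : ((j : Int) + 1) ∈ vip
    · -- seat j+1 is VIP: run resets, product absorbs fib2 run
      have hst : st vip (j+1) = ((st vip j).1 * fib2 (st vip j).2, 0) := by
        simp [st, h]
      refine ⟨?_, Or.inl (by simp [hst])⟩
      rw [hst]
      cases j with
      | zero => simp [dpm, st, fib2]
      | succ m =>
        have hc : ((m : Int) + 2) ∈ vip := by
          have e : ((m : Int) + 2) = ((m + 1 : Nat) : Int) + 1 := by push_cast; ring
          rw [e]; exact h
        show dpm vip (m+2) = _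
        rw [dpm, if_pos (Or.inl hc)]
        simpa [fib2] using ih1
    · -- seat j+1 free: run grows by one
      have hst : st vip (j+1) = ((st vip j).1, (st vip j).2 + 1) := by
        simp [st, h]
      refine ⟨?_, Or.inr ?_⟩
      · rw [hst]
        cases j with
        | zero => simp [dpm, st, fib2]
        | succ m =>
          have hc : ((m : Int) + 2) ∉ vip := by
            have e : ((m : Int) + 2) = ((m + 1 : Nat) : Int) + 1 := by push_cast; ring
            rw [e]; exact h
          show dpm vip (m+2) = _
          by_cases hp : ((m : Int) + 1) ∈ vip
          · -- previous seat VIP: run was 0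
            have hrun : (st vip (m+1)).2 = 0 := by simp [st, hp]
            rw [dpm, if_pos (Or.inr hp), ih1, hrun]
            simp [fib2]
          · -- two free seats in a row: Fibonacci step
            have hrun : (st vip (m+1)).2 = (st vip m).2 + 1 := by simp [st, hp]
            have hdm : dpm vip m = (st vip (m+1)).1 * fib2 ((st vip (m+1)).2 - 1) := by
              rcases ih2 with h0 | h0
              · rw [hrun] at h0; exact absurd h0 (Nat.succ_ne_zero _)
              · simpa using h0
            rw [dpm, if_neg (by tauto), ih1, hdm, hrun]
            simp only [Nat.add_sub_cancel, show (st vip m).2 + 1 + 1 = (st vip m).2 + 2 from rfl,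
              fib2]
            ring
      · rw [hst]
        simp only [Nat.add_sub_cancel]
        exact ih1

-- B's fold equals the state model
theorem b_fold (vip : List Int) (m : Nat) :
    (PySem.List.pyRange 1 ((m : Int) + 1) 1).foldl
        (fun (p : Int × Int) i =>
          if vip.contains i then (p.1 * tiling p.2, 0) else (p.1, p.2 + 1)) (1, 0)
      = ((st vip m).1, ((st vip m).2 : Int)) := by
  induction m with
  | zero => simp [PySem.List.pyRange_one_eq_nil, st]
  | succ j ih =>
    rw [show ((j+1 : Nat) : Int) + 1 = ((j : Int) + 1) + 1 by push_cast; ring,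
        PySem.List.pyRange_one_succ_right (by omega), List.foldl_append, ih]
    by_cases h : ((j : Int) + 1) ∈ vip
    · simp [st, h, tiling_nat]
    · simp [st, h]

theorem solve_alt_eq_dpm (vip : List Int) (n : Int) (hn : 0 ≤ n) :
    solve_alt n vip = dpm vip n.toNat := by
  unfold solve_alt
  rw [show n + 1 = (n.toNat : Int) + 1 by omega, b_fold]
  show (st vip n.toNat).1 * tiling ((st vip n.toNat).2 : Int) = dpm vip n.toNat
  rw [tiling_nat, (inv vip n.toNat).1]

-- A's fold maintains dp[j] = dpm j for every processed index j
theorem a_fold (vip : List Int) (N : Nat) (hN : 1 ≤ N) (m : Nat) (hm1 : 1 ≤ m) (hm2 : m ≤ N) :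
    ((PySem.List.pyRange 2 ((m : Int) + 1) 1).foldl
        (fun dp i =>
          if vip.contains i || vip.contains (i - 1) then
            dp.set i.toNat (PySem.List.pyGetD dp (i - 1) 0)
          else
            dp.set i.toNat (PySem.List.pyGetD dp (i - 1) 0 + PySem.List.pyGetD dp (i - 2) 0))
        (((List.replicate (N + 1) (0 : Int)).set 0 1).set 1 1)).length = N + 1 ∧
    ∀ j : Nat, j ≤ m →
      ((PySem.List.pyRange 2 ((m : Int) + 1) 1).foldl
        (fun dp i =>
          if vip.contains i || vip.contains (i - 1) then
            dp.set i.toNat (PySem.List.pyGetD dp (i - 1) 0)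
          else
            dp.set i.toNat (PySem.List.pyGetD dp (i - 1) 0 + PySem.List.pyGetD dp (i - 2) 0))
        (((List.replicate (N + 1) (0 : Int)).set 0 1).set 1 1))[j]? = some (dpm vip j) := by
  induction m with
  | zero => omega
  | succ k ih =>
    by_cases hk : k = 0
    · subst hk
      rw [show ((1 : Nat) : Int) + 1 = 2 by norm_num, PySem.List.pyRange_one_eq_nil (by omega)]
      simp only [List.foldl_nil]
      refine ⟨by simp, ?_⟩
      intro j hj
      interval_cases j <;>
        simp [List.getElem?_set, List.length_replicate, dpm] <;> omega
    · obtain ⟨ihl, ihv⟩ := ih (by omega) (by omega)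
      rw [show ((k+1 : Nat) : Int) + 1 = ((k : Int) + 1) + 1 by push_cast; ring,
          PySem.List.pyRange_one_succ_right (by omega), List.foldl_append, List.foldl_cons,
          List.foldl_nil]
      set L := (PySem.List.pyRange 2 ((k : Int) + 1) 1).foldl
        (fun dp i =>
          if vip.contains i || vip.contains (i - 1) then
            dp.set i.toNat (PySem.List.pyGetD dp (i - 1) 0)
          else
            dp.set i.toNat (PySem.List.pyGetD dp (i - 1) 0 + PySem.List.pyGetD dp (i - 2) 0))
        (((List.replicate (N + 1) (0 : Int)).set 0 1).set 1 1) with hL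
      have hget1 : PySem.List.pyGetD L ((k : Int) + 1 - 1) 0 = dpm vip k := by
        rw [show (k : Int) + 1 - 1 = ((k : Nat) : Int) by ring, PySem.List.pyGetD_natCast,
            List.getD_eq_getElem?_getD, ihv k (le_refl k)]
        rfl
      have hget2 : PySem.List.pyGetD L ((k : Int) + 1 - 2) 0 = dpm vip (k - 1) := by
        rw [show (k : Int) + 1 - 2 = ((k - 1 : Nat) : Int) by
              push_cast [Nat.cast_sub (by omega : 1 ≤ k)]; ring,
            PySem.List.pyGetD_natCast, List.getD_eq_getElem?_getD, ihv (k-1) (by omega)]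
        rfl
      have htn : ((k : Int) + 1).toNat = k + 1 := by omega
      have hdpm : dpm vip (k + 1) =
          if ((k : Int) + 1) ∈ vip ∨ ((k : Int) + 1 - 1) ∈ vip
          then dpm vip k else dpm vip k + dpm vip (k - 1) := by
        obtain ⟨k', rfl⟩ : ∃ k', k = k' + 1 := ⟨k - 1, by omega⟩
        show dpm vip (k' + 2) = _
        rw [dpm]
        have e1 : ((k' : Int)) + 2 = ((k' + 1 : Nat) : Int) + 1 := by push_cast; ring
        have e2 : ((k' : Int)) + 1 = ((k' + 1 : Nat) : Int) + 1 - 1 := by push_cast; ring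
        rw [e1, e2]
        simp
      have hL' : (if vip.contains ((k : Int) + 1) || vip.contains ((k : Int) + 1 - 1) then
            L.set ((k : Int) + 1).toNat (PySem.List.pyGetD L ((k : Int) + 1 - 1) 0)
          else
            L.set ((k : Int) + 1).toNat
              (PySem.List.pyGetD L ((k : Int) + 1 - 1) 0 + PySem.List.pyGetD L ((k : Int) + 1 - 2) 0))
          = L.set (k + 1) (dpm vip (k + 1)) := by
        rw [htn, hget1, hget2]
        by_cases hc : ((k : Int) + 1) ∈ vip ∨ ((k : Int) + 1 - 1) ∈ vip
        · rw [if_pos (by simpa using hc), hdpm, if_pos hc]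
        · rw [if_neg (by simpa using hc), hdpm, if_neg hc]
      rw [hL']
      refine ⟨by simp [List.length_set, ihl], ?_⟩
      intro j hj
      by_cases hjk : j = k + 1
      · subst hjk
        rw [List.getElem?_set_self (by omega)]
      · rw [List.getElem?_set_ne (by omega)]
        exact ihv j (by omega)

theorem solve_eq (n : Int) (vip : List Int) (hn : 1 ≤ n) : solve n vip = solve_alt n vip := by
  unfold solve
  by_cases h1 : n = 1
  · subst h1
    rw [if_pos rfl, solve_alt_eq_dpm vip 1 (by omega)]
    simp [dpm]
  · rw [if_neg h1]
    have hN : 1 ≤ n.toNat := by omega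
    rw [solve_alt_eq_dpm vip n (by omega)]
    obtain ⟨hl, hv⟩ := a_fold vip n.toNat hN n.toNat hN (le_refl _)
    rw [show n = ((n.toNat : Nat) : Int) by omega]
    simp only [Int.toNat_natCast]
    rw [show ((n.toNat : Int) + 1).toNat = n.toNat + 1 by omega]
    rw [PySem.List.pyGetD_natCast, List.getD_eq_getElem?_getD, hv n.toNat (le_refl _)]
    rfl

-- ===== VERDICT (by name: the statement is the Claim_ definition above) =====
theorem solve_spec : Claim_equal_solve := by
  intro n vip _ hpre
  unfold Spec_solve
  exact solve_eq n vip hpre
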